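-- pv_equiv track=rewrite | github.com/EchoedRadani/static-site-generator | src/block_markdown.py | is_heading
-- ===== SOURCE A (Python) =====
-- def is_heading(block):
--     if block.startswith("#"):
--         check_lines = block.split("\n")
--         if len(check_lines) == 1:
--             line = check_lines[0]
--             count = 0
--             for letter in line:
--                 if letter == "#":
--                     count += 1
--                 else:
--                     break
--             if len(line) > count + 1:
--                 line_space = line[count]
--                 text = line[count + 1:]
--                 is_line_space = line_space == " "
--                 is_text = len(text) > 0
--                 return 0 < count <= 6 and is_line_space and is_text
--             else:
--                 return False
--     return False
-- ===== SOURCE B (Python) =====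
-- def is_heading(block):
--     if "\n" in block:
--         return False
--     hashes, sep, text = block.partition(" ")
--     return (sep == " " and 0 < len(hashes) <= 6
--             and all(c == "#" for c in hashes) and text != "")
-- ===== Notes on version B (the rewrite author's own statement) =====
-- stated objective: simpler
-- what changed: Replaces A's startswith/split/manual hash-counting loop with a single partition at the first space: the prefix before it must be one to six hash signs and the remainder non-empty, with one up-front newline check.
import Mathlib
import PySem

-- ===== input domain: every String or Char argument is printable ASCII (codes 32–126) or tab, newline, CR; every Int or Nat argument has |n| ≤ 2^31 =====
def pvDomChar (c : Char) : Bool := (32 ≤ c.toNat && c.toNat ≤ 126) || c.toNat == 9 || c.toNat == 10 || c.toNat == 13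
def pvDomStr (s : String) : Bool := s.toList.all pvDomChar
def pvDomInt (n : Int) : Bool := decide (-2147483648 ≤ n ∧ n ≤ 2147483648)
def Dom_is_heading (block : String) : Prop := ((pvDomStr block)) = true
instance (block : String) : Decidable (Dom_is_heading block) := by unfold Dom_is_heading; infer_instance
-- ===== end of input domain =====

-- B replaces A's manual leading-'#' counting loop by a single partition at the first space
-- (objective: simpler); return values agree on every input, A raises on none.

-- ===== PORT A =====
-- A's 'for letter in line: if letter == "#": count += 1 else: break' (count of the leading '#'-run)
def countHashA : List Char → Nat
  | [] => 0
  | c :: t => if c = '#' then countHashA t + 1 else 0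

def is_heading (block : String) : Bool :=
  if PySem.Chars.startswith block.toList ['#'] then
    let check_lines := PySem.Chars.splitOn block.toList ['\n']
    if check_lines.length = 1 then
      let line := check_lines.getD 0 []
      let count := countHashA line
      if line.length > count + 1 then
        let line_space := PySem.List.pyGetD line (count : Int) ' '  -- line[count]; in range by the guard
        let text := PySem.List.slice line (some ((count : Int) + 1)) none
        decide (0 < count) && decide (count ≤ 6) && (line_space == ' ') && decide (text.length > 0)
      else false
    else false
  else false

-- ===== PORT B =====
def is_heading_alt (block : String) : Bool :=
  if PySem.Chars.isIn ['\n'] block.toList then false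
  else
    -- block.partition(" ") ported by hand: cut at the first occurrence of ' ' (Chars.find), exact;
    -- 'sep == " "' is 'find ≠ -1'
    let cs := block.toList
    let i := PySem.Chars.find cs [' ']
    if i = -1 then false
    else
      let hashes := cs.take i.toNat
      let text := cs.drop (i.toNat + 1)
      decide (0 < hashes.length) && decide (hashes.length ≤ 6) &&
        hashes.all (· == '#') && !text.isEmpty

-- ===== PRECONDITION & SPEC =====
def Spec_is_heading (block : String) (out : Bool) : Prop := out = is_heading_alt block
instance (block : String) (out : Bool) : Decidable (Spec_is_heading block out) := by unfold Spec_is_heading; infer_instance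

-- ===== CLAIM (what is proved, stated in full; the proofs are below) =====
def Claim_equal_is_heading : Prop := ∀ (block : String), Dom_is_heading block → Spec_is_heading block (is_heading block)

-- ===== LEMMAS AND PROOFS =====

-- splitOn.go on a newline-free rest just flushes
theorem go_no_nl : ∀ (fuel : Nat) (l cur : List Char) (acc : List (List Char)),
    l.length ≤ fuel → '\n' ∉ l →
    PySem.Chars.splitOn.go ['\n'] fuel l cur acc = ((cur.reverse ++ l) :: acc).reverse := by
  intro fuel
  induction fuel with
  | zero =>
    intro l cur acc hf _
    have : l = [] := List.eq_nil_of_length_eq_zero (Nat.le_zero.mp hf)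
    subst this; simp [PySem.Chars.splitOn.go]
  | succ n ih =>
    intro l cur acc hf hnl
    cases l with
    | nil => simp [PySem.Chars.splitOn.go]
    | cons c rest =>
      have hc : c ≠ '\n' := fun h => hnl (h ▸ List.mem_cons_self)
      have : ¬ (List.isPrefixOf ['\n'] (c :: rest) = true) := by
        simp [List.isPrefixOf]; exact fun h => absurd h.symm hc
      simp only [PySem.Chars.splitOn.go, this]
      rw [ih rest (c :: cur) acc (by simpa using Nat.lt_succ_iff.mp (by simpa using hf))
        (fun h => hnl (List.mem_cons_of_mem _ h))]
      simp

theorem go_len_ge : ∀ (fuel : Nat) (l cur : List Char) (acc : List (List Char)),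
    acc.length + 1 ≤ (PySem.Chars.splitOn.go ['\n'] fuel l cur acc).length := by
  intro fuel
  induction fuel with
  | zero => intro l cur acc; simp [PySem.Chars.splitOn.go]
  | succ n ih =>
    intro l cur acc
    cases l with
    | nil => simp [PySem.Chars.splitOn.go]
    | cons c rest =>
      by_cases hc : List.isPrefixOf ['\n'] (c :: rest) = true
      · simp only [PySem.Chars.splitOn.go, hc, if_true]
        have := ih (List.drop (['\n'] : List Char).length (c :: rest)) [] (cur.reverse :: acc)
        simpa using Nat.le_of_succ_le (by simpa using this)
      · simp only [PySem.Chars.splitOn.go, hc]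
        exact ih rest (c :: cur) acc

theorem go_nl : ∀ (fuel : Nat) (l cur : List Char) (acc : List (List Char)),
    l.length ≤ fuel → '\n' ∈ l →
    acc.length + 2 ≤ (PySem.Chars.splitOn.go ['\n'] fuel l cur acc).length := by
  intro fuel
  induction fuel with
  | zero =>
    intro l cur acc hf hm
    have : l = [] := List.eq_nil_of_length_eq_zero (Nat.le_zero.mp hf)
    subst this; simp at hm
  | succ n ih =>
    intro l cur acc hf hm
    cases l with
    | nil => simp at hm
    | cons c rest =>
      by_cases hc : List.isPrefixOf ['\n'] (c :: rest) = true
      · simp only [PySem.Chars.splitOn.go, hc, if_true]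
        have := go_len_ge n (List.drop (['\n'] : List Char).length (c :: rest)) [] (cur.reverse :: acc)
        simpa using this
      · have hcne : c ≠ '\n' := by
          intro h; apply hc; simp [List.isPrefixOf, h]
        simp only [PySem.Chars.splitOn.go, hc]
        exact ih rest (c :: cur) acc (by simpa using Nat.lt_succ_iff.mp (by simpa using hf))
          ((List.mem_cons.mp hm).resolve_left (fun h => hcne h.symm))

theorem splitOn_no_nl (cs : List Char) (h : '\n' ∉ cs) :
    PySem.Chars.splitOn cs ['\n'] = [cs] := by
  unfold PySem.Chars.splitOn
  rw [go_no_nl (cs.length + 1) cs [] [] (Nat.le_succ _) h]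
  simp

theorem splitOn_nl (cs : List Char) (h : '\n' ∈ cs) :
    (PySem.Chars.splitOn cs ['\n']).length ≠ 1 := by
  unfold PySem.Chars.splitOn
  have := go_nl (cs.length + 1) cs [] [] (Nat.le_succ _) h
  omega

-- countHashA facts
theorem ch_get (l : List Char) (j : Nat) (h : j < countHashA l) : l[j]? = some '#' := by
  induction l generalizing j with
  | nil => simp [countHashA] at h
  | cons c t ih =>
    by_cases hc : c = '#'
    · cases j with
      | zero => simp [hc]
      | succ m =>
        simp [countHashA, hc] at h
        simpa using ih m (by omega)
    · simp [countHashA, hc] at h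

theorem ch_of (k : Nat) (c : Char) (t : List Char) (h : c ≠ '#') :
    countHashA (List.replicate k '#' ++ c :: t) = k := by
  induction k with
  | zero => simp [countHashA, h]
  | succ m ih => simpa [List.replicate_succ, countHashA] using ih

-- the clean characterisation used by both directions: [' '] <+: cs.drop j ↔ cs[j]? = some ' '
theorem space_prefix_iff (cs : List Char) (j : Nat) :
    ([' '] <+: cs.drop j) ↔ cs[j]? = some ' ' := by
  rw [← List.head?_drop]
  cases hd : cs.drop j with
  | nil => simp
  | cons a t =>
    constructor
    · rintro ⟨u, hu⟩
      simp at hu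
      simp [hu.1.symm]
    · intro h; simp at h; exact ⟨t, by simp [h]⟩

theorem main_eq (block : String) : is_heading block = is_heading_alt block := by
  rw [Bool.eq_iff_iff]
  set cs := block.toList with hcs
  by_cases hnl : '\n' ∈ cs
  · -- newline present: both sides are false
    constructor
    · intro hA
      exfalso
      simp only [is_heading] at hA
      rw [← hcs] at hA
      split_ifs at hA with h1 h2
      exact splitOn_nl cs hnl h2
    · intro hB
      exfalso
      simp only [is_heading_alt] at hB
      rw [← hcs] at hB
      have : PySem.Chars.isIn ['\n'] cs = true := by
        rw [PySem.Chars.isIn_iff_infix]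
        exact (List.singleton_infix_iff _ _).mpr hnl
      rw [if_pos this] at hB
      exact Bool.false_ne_true hB
  · -- no newline: split is [cs], partition at the first space
    have hsplit := splitOn_no_nl cs hnl
    have hnotin : PySem.Chars.isIn ['\n'] cs = false := by
      rw [PySem.Chars.isIn_eq_false_iff]
      intro h; exact hnl ((List.singleton_infix_iff _ _).mp h)
    constructor
    · -- A → B
      intro hA
      simp only [is_heading] at hA
      rw [← hcs] at hA
      split_ifs at hA with h1 h2 h3
      · rw [hsplit] at hA h3
        simp only [List.getD_cons_zero] at hA h3
        set k := countHashA cs with hk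
        have hklen : k + 1 < cs.length := h3
        simp only [Bool.and_eq_true, decide_eq_true_eq, beq_iff_eq] at hA
        obtain ⟨⟨⟨hk0, hk6⟩, hsp⟩, _⟩ := hA
        have hksome : cs[k]? = some ' ' := by
          rw [PySem.List.pyGetD_natCast, List.getD_eq_getElem _ _ (by omega)] at hsp
          rw [List.getElem?_eq_getElem (by omega)]
          simp [hsp]
        -- find cs [' '] = k
        have hpref : [' '] <+: cs.drop k := (space_prefix_iff cs k).mpr hksome
        have hinf : ([' '] : List Char) <:+: cs :=
          (List.singleton_infix_iff _ _).mpr (List.mem_of_getElem? hksome)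
        have hfind0 : 0 ≤ PySem.Chars.find cs [' '] := (PySem.Chars.find_nonneg_iff _ _).mpr hinf
        obtain ⟨hp, hmin⟩ := PySem.Chars.find_spec hfind0
        set i := (PySem.Chars.find cs [' ']).toNat with hi
        have hik : i = k := by
          have h1' : ¬ k < i := fun h => hmin k h hpref
          have h2' :¬ i < k := by
            intro h
            have := (space_prefix_iff cs i).mp hp
            rw [ch_get cs i (hk ▸ h)] at this
            simp at this
          omega
        have hfindk : PySem.Chars.find cs [' '] = (k : Int) := by omega
        simp only [is_heading_alt]
        rw [← hcs, if_neg (by simp [hnotin])]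
        simp only [hfindk]
        rw [if_neg (by omega)]
        have htoNat : ((k : Int)).toNat = k := by omega
        rw [htoNat]
        have htk : (cs.take k).length = k := by
          rw [List.length_take]; omega
        simp only [Bool.and_eq_true, decide_eq_true_eq]
        refine ⟨⟨⟨by omega, by omega⟩, ?_⟩, ?_⟩
        · rw [List.all_eq_true]
          intro x hx
          obtain ⟨j, hj, hjx⟩ := List.getElem_of_mem hx
          have hjk : j < k := by rw [htk] at hj; exact hj
          have := ch_get cs j (hk ▸ hjk)
          rw [List.getElem_take] at hjx
          rw [List.getElem?_eq_getElem (by omega)] at this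
          simp at this
          simp [← hjx, this]
        · simp only [Bool.not_eq_eq_eq_not, Bool.not_true, List.isEmpty_eq_false_iff]
          intro h
          have := List.drop_eq_nil_iff.mp h
          omega
    · -- B → A
      intro hB
      simp only [is_heading_alt] at hB
      rw [← hcs, if_neg (by simp [hnotin])] at hB
      split_ifs at hB with hfneg
      have hfind0 : 0 ≤ PySem.Chars.find cs [' '] := by
        have := PySem.Chars.neg_one_le_find (s := cs) (sub := [' '])
        omega
      obtain ⟨hp, hmin⟩ := PySem.Chars.find_spec hfind0
      set i := (PySem.Chars.find cs [' ']).toNat with hi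
      have hisome : cs[i]? = some ' ' := (space_prefix_iff cs i).mp hp
      have hilen : i < cs.length := by
        by_contra h
        rw [List.getElem?_eq_none (by omega)] at hisome
        simp at hisome
      simp only [Bool.and_eq_true, decide_eq_true_eq] at hB
      obtain ⟨⟨⟨hi0, hi6⟩, hall⟩, hne⟩ := hB
      have htk : (cs.take i).length = i := by rw [List.length_take]; omega
      rw [htk] at hi0 hi6
      have hjh : ∀ j < i, cs[j]? = some '#' := by
        intro j hj
        have hx : cs[j] ∈ cs.take i := by
          rw [List.mem_take_iff_getElem]
          exact ⟨j, by omega, rfl⟩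
        rw [List.all_eq_true] at hall
        have := hall _ hx
        simp at this
        rw [List.getElem?_eq_getElem (by omega)]
        simp [this]
      -- cs = replicate i '#' ++ ' ' :: cs.drop (i+1)
      have htake : cs.take i = List.replicate i '#' := by
        apply List.ext_getElem (by simp [htk])
        intro j hj1 hj2
        rw [List.getElem_take]
        have := hjh j (by omega)
        rw [List.getElem?_eq_getElem (by omega)] at this
        simp at this
        simp [this]
      have hdecomp : cs = List.replicate i '#' ++ ' ' :: cs.drop (i + 1) := by
        conv_lhs => rw [← List.take_append_drop i cs]
        rw [htake, List.drop_eq_getElem_cons hilen]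
        congr 2
        have := hisome
        rw [List.getElem?_eq_getElem hilen] at this
        simpa using this
      have hch : countHashA cs = i := by
        rw [hdecomp]; exact ch_of i ' ' _ (by decide)
      have htextne : i + 1 < cs.length := by
        by_contra h
        rw [List.drop_eq_nil_iff.mpr (by omega)] at hne
        simp at hne
      simp only [is_heading]
      rw [← hcs]
      have h0 : cs[0]? = some '#' := hjh 0 hi0
      have hsw : PySem.Chars.startswith cs ['#'] = true := by
        rw [PySem.Chars.startswith_iff]
        cases hcase : cs with
        | nil => rw [hcase] at h0; simp at h0
        | cons a t =>
          rw [hcase] at h0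
          simp at h0
          exact ⟨t, by simp [h0]⟩
      rw [if_pos hsw, hsplit]
      rw [if_pos (show (List.length [cs] = 1) from rfl)]
      simp only [List.getD_cons_zero]
      rw [hch]
      rw [if_pos (show cs.length > i + 1 by omega)]
      simp only [Bool.and_eq_true, decide_eq_true_eq, beq_iff_eq]
      refine ⟨⟨⟨by omega, by omega⟩, ?_⟩, ?_⟩
      · rw [PySem.List.pyGetD_natCast]
        rw [List.getD_eq_getElem _ _ (by omega)]
        have := hisome
        rw [List.getElem?_eq_getElem hilen] at this
        simpa using this
      · have : ((i : Int) + 1) = ((i + 1 : Nat) : Int) := by push_cast; ring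
        rw [this, PySem.List.slice_from_natCast]
        rw [List.length_drop]
        omega

-- ===== VERDICT (by name: the statement is the Claim_ definition above) =====
theorem is_heading_spec : Claim_equal_is_heading := by
  intro block _
  unfold Spec_is_heading
  exact main_eq block
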